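-- pv_equiv track=rewrite | github.com/alimtvnetwork/movie-cli-v7 | scripts/check-acronym-naming.py | strip_go
-- ===== SOURCE A (Python) =====
-- def strip_go(src: str) -> str:
--     """Replace comments and string/rune literal contents with spaces.
--
--     Newlines are preserved so line numbers in the stripped output match the
--     original source 1:1.
--     """
--     out: list[str] = []
--     i, n = 0, len(src)
--     state = 'code'
--     while i < n:
--         c = src[i]
--         c2 = src[i:i + 2]
--         if state == 'code':
--             if c2 == '//':
--                 out.append('  '); state = 'line_comment'; i += 2; continue
--             if c2 == '/*':
--                 out.append('  '); state = 'block_comment'; i += 2; continue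
--             if c == '"':
--                 out.append(' '); state = 'str'; i += 1; continue
--             if c == '`':
--                 out.append(' '); state = 'rstr'; i += 1; continue
--             if c == "'":
--                 out.append(' '); state = 'rune'; i += 1; continue
--             out.append(c); i += 1; continue
--         if state == 'line_comment':
--             if c == '\n':
--                 out.append('\n'); state = 'code'; i += 1; continue
--             out.append('\t' if c == '\t' else ' '); i += 1; continue
--         if state == 'block_comment':
--             if c2 == '*/':
--                 out.append('  '); state = 'code'; i += 2; continue
--             out.append('\n' if c == '\n' else ('\t' if c == '\t' else ' '))
--             i += 1; continue
--         if state == 'str':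
--             if c == '\\' and i + 1 < n:
--                 out.append('  '); i += 2; continue
--             if c == '"':
--                 out.append(' '); state = 'code'; i += 1; continue
--             out.append('\n' if c == '\n' else ' '); i += 1; continue
--         if state == 'rstr':
--             if c == '`':
--                 out.append(' '); state = 'code'; i += 1; continue
--             out.append('\n' if c == '\n' else ' '); i += 1; continue
--         if state == 'rune':
--             if c == '\\' and i + 1 < n:
--                 out.append('  '); i += 2; continue
--             if c == "'":
--                 out.append(' '); state = 'code'; i += 1; continue
--             out.append(' '); i += 1; continue
--     return ''.join(out)
-- ===== SOURCE B (Python) =====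
-- def _blank(seg: str, keep: str) -> str:
--     return ''.join(ch if ch in keep else ' ' for ch in seg)
--
--
-- def _scan_quoted(src: str, i: int, quote: str, keep_nl: bool):
--     """Scan a "/' literal from i (past the opener); return (blanked chunk incl. closer, next index)."""
--     n = len(src)
--     out = []
--     while i < n:
--         c = src[i]
--         if c == '\\' and i + 1 < n:
--             out.append('  '); i += 2
--         elif c == quote:
--             out.append(' '); return ''.join(out), i + 1
--         else:
--             out.append('\n' if (keep_nl and c == '\n') else ' '); i += 1
--     return ''.join(out), n
--
--
-- def strip_go(src: str) -> str:
--     """Replace comments and string/rune literal contents with spaces.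
--
--     Region-based: copy code runs verbatim, then locate each region's
--     terminator and blank the whole region at once.
--     """
--     n = len(src)
--     out = []
--     i = 0
--     while i < n:
--         c = src[i]
--         if c == '/' and src.startswith('//', i):
--             j = src.find('\n', i + 2)
--             if j < 0:
--                 out.append('  ' + _blank(src[i + 2:], '\t')); i = n
--             else:
--                 out.append('  ' + _blank(src[i + 2:j], '\t') + '\n'); i = j + 1
--         elif c == '/' and src.startswith('/*', i):
--             j = src.find('*/', i + 2)
--             if j < 0:
--                 out.append('  ' + _blank(src[i + 2:], '\t\n')); i = n
--             else:
--                 out.append('  ' + _blank(src[i + 2:j], '\t\n') + '  '); i = j + 2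
--         elif c == '`':
--             j = src.find('`', i + 1)
--             if j < 0:
--                 out.append(' ' + _blank(src[i + 1:], '\n')); i = n
--             else:
--                 out.append(' ' + _blank(src[i + 1:j], '\n') + ' '); i = j + 1
--         elif c == '"':
--             chunk, i = _scan_quoted(src, i + 1, '"', True)
--             out.append(' ' + chunk)
--         elif c == "'":
--             chunk, i = _scan_quoted(src, i + 1, "'", False)
--             out.append(' ' + chunk)
--         else:
--             j = i
--             while j < n:
--                 ch = src[j]
--                 if ch in '"`\'':
--                     break
--                 if ch == '/' and (src.startswith('//', j) or src.startswith('/*', j)):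
--                     break
--                 j += 1
--             out.append(src[i:j]); i = j
--     return ''.join(out)
-- ===== Notes on version B (the rewrite author's own statement) =====
-- stated objective: alternative
-- what changed: Replaced the per-character state-machine loop (one state variable, one branch chain per character) by a region-based scanner: code runs are copied verbatim as slices, each comment/raw-string region is located with find and blanked in bulk, and only escaped literals are scanned by a dedicated helper.
import Mathlib
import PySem

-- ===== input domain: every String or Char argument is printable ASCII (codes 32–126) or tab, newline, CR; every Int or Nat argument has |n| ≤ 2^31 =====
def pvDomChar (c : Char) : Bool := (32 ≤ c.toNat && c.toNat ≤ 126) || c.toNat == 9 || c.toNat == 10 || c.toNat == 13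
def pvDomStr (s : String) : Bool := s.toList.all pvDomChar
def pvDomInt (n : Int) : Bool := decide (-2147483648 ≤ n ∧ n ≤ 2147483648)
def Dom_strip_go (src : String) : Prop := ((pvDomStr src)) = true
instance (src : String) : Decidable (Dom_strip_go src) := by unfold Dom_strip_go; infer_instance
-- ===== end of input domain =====

-- B replaces A's per-character state machine by a region-based scanner (verbatim code
-- runs, bulk blanking of located regions); equal return values on every input.

-- ===== PORT A =====
inductive GoSt where
  | code | lineC | blockC | strS | rstrS | runeS
deriving DecidableEq, Repr

-- literal transliteration of A's while loop: one step per character, state variable,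
-- branches in A's order (c2 == 'xy' ported as c = 'x' ∧ cs.head? = some 'y')
def loopA (st : GoSt) : List Char → List Char
  | [] => []
  | c :: cs =>
    match st with
    | .code =>
      if c = '/' ∧ cs.head? = some '/' then ' ' :: ' ' :: loopA .lineC cs.tail else
      if c = '/' ∧ cs.head? = some '*' then ' ' :: ' ' :: loopA .blockC cs.tail else
      if c = '"' then ' ' :: loopA .strS cs else
      if c = '`' then ' ' :: loopA .rstrS cs else
      if c = '\'' then ' ' :: loopA .runeS cs else
      c :: loopA .code cs
    | .lineC =>
      if c = '\n' then '\n' :: loopA .code cs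
      else (if c = '\t' then '\t' else ' ') :: loopA .lineC cs
    | .blockC =>
      if c = '*' ∧ cs.head? = some '/' then ' ' :: ' ' :: loopA .code cs.tail
      else (if c = '\n' then '\n' else if c = '\t' then '\t' else ' ') :: loopA .blockC cs
    | .strS =>
      if c = '\\' ∧ cs ≠ [] then ' ' :: ' ' :: loopA .strS cs.tail else
      if c = '"' then ' ' :: loopA .code cs else
      (if c = '\n' then '\n' else ' ') :: loopA .strS cs
    | .rstrS =>
      if c = '`' then ' ' :: loopA .code cs
      else (if c = '\n' then '\n' else ' ') :: loopA .rstrS cs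
    | .runeS =>
      if c = '\\' ∧ cs ≠ [] then ' ' :: ' ' :: loopA .runeS cs.tail else
      if c = '\'' then ' ' :: loopA .code cs else
      ' ' :: loopA .runeS cs
termination_by l => l.length
decreasing_by all_goals simp [List.length_tail]; try omega

def strip_go (src : String) : String := String.mk (loopA .code src.toList)

-- ===== PORT B =====
-- src.find(t, i): split the list at the first occurrence of t (terminator dropped)
def findSplit (t : Char) : List Char → Option (List Char × List Char)
  | [] => none
  | c :: cs =>
    if c = t then some ([], cs)
    else (findSplit t cs).map (fun pr => (c :: pr.1, pr.2))

-- src.find('*/', i)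
def findSplit2 : List Char → Option (List Char × List Char)
  | [] => none
  | [_] => none
  | c :: d :: cs =>
    if c = '*' ∧ d = '/' then some ([], cs)
    else (findSplit2 (d :: cs)).map (fun pr => (c :: pr.1, pr.2))

-- _blank with keep = '\t', '\t\n', '\n'
def blankLC (c : Char) : Char := if c = '\t' then '\t' else ' '
def blankBC (c : Char) : Char := if c = '\n' then '\n' else if c = '\t' then '\t' else ' '
def blankRS (c : Char) : Char := if c = '\n' then '\n' else ' '

-- _scan_quoted: blanked chunk (incl. closer) and the rest after the region
def scanQuoted (quote : Char) (keepNl : Bool) : List Char → List Char × List Char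
  | [] => ([], [])
  | [c] =>
    if c = quote then ([' '], [])
    else ([if keepNl ∧ c = '\n' then '\n' else ' '], [])
  | c :: d :: cs =>
    if c = '\\' then
      let pr := scanQuoted quote keepNl cs; (' ' :: ' ' :: pr.1, pr.2)
    else if c = quote then ([' '], d :: cs)
    else
      let pr := scanQuoted quote keepNl (d :: cs)
      ((if keepNl ∧ c = '\n' then '\n' else ' ') :: pr.1, pr.2)

-- the inner j-loop of B's else branch: verbatim code run up to the next delimiter
def codeRun : List Char → List Char × List Char
  | [] => ([], [])
  | c :: cs =>
    if c = '"' ∨ c = '`' ∨ c = '\'' then ([], c :: cs)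
    else if c = '/' ∧ (cs.head? = some '/' ∨ cs.head? = some '*') then ([], c :: cs)
    else let pr := codeRun cs; (c :: pr.1, pr.2)

theorem findSplit_rest_length (t : Char) (l p r : List Char)
    (h : findSplit t l = some (p, r)) : r.length < l.length := by
  induction l generalizing p r with
  | nil => simp [findSplit] at h
  | cons c cs ih =>
    by_cases hc : c = t
    · simp [findSplit, hc] at h; simp [← h.2]
    · simp only [findSplit, if_neg hc, Option.map_eq_some_iff] at h
      obtain ⟨⟨q, s⟩, hqs, h2⟩ := h
      have := ih q s hqs
      cases h2; simp; omega

theorem findSplit2_rest_length (l p r : List Char)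
    (h : findSplit2 l = some (p, r)) : r.length < l.length := by
  fun_induction findSplit2 l generalizing p r with
  | case1 => cases h
  | case2 => cases h
  | case3 c d cs hC => cases h; simp
  | case4 c d cs hC ih =>
    rw [Option.map_eq_some_iff] at h
    obtain ⟨⟨q, s⟩, hqs, h2⟩ := h
    have := ih q s hqs
    cases h2; simp at this ⊢; omega

theorem scanQuoted_rest_length (quote : Char) (keepNl : Bool) (l : List Char) :
    (scanQuoted quote keepNl l).2.length ≤ l.length := by
  fun_induction scanQuoted quote keepNl l with
  | case1 => simp
  | case2 => simp
  | case3 => simp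
  | case4 d cs pr ih =>
    show (scanQuoted quote keepNl cs).2.length ≤ ('\\' :: d :: cs).length
    simp at ih ⊢; omega
  | case5 d cs h => simp
  | case6 c d cs h1 h2 pr ih =>
    show (scanQuoted quote keepNl (d :: cs)).2.length ≤ (c :: d :: cs).length
    simp at ih ⊢; omega

theorem codeRun_rest_length (l : List Char) : (codeRun l).2.length ≤ l.length := by
  fun_induction codeRun l with
  | case1 => simp
  | case2 c cs h => simp
  | case3 c cs h1 h2 => simp
  | case4 c cs h1 h2 pr ih =>
    show (codeRun cs).2.length ≤ (c :: cs).length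
    simp at ih ⊢; omega

-- B's outer while loop: one iteration per region
def goB : List Char → List Char
  | [] => []
  | [c] => if c = '"' ∨ c = '`' ∨ c = '\'' then [' '] else [c]
  | c :: d :: cs =>
    if c = '/' ∧ d = '/' then
      match h : findSplit '\n' cs with
      | none => ' ' :: ' ' :: cs.map blankLC
      | some (p, r) => ' ' :: ' ' :: (p.map blankLC ++ '\n' :: goB r)
    else if c = '/' ∧ d = '*' then
      match h : findSplit2 cs with
      | none => ' ' :: ' ' :: cs.map blankBC
      | some (p, r) => ' ' :: ' ' :: (p.map blankBC ++ ' ' :: ' ' :: goB r)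
    else if c = '`' then
      match h : findSplit '`' (d :: cs) with
      | none => ' ' :: (d :: cs).map blankRS
      | some (p, r) => ' ' :: (p.map blankRS ++ ' ' :: goB r)
    else if c = '"' then
      let pr := scanQuoted '"' true (d :: cs); ' ' :: (pr.1 ++ goB pr.2)
    else if c = '\'' then
      let pr := scanQuoted '\'' false (d :: cs); ' ' :: (pr.1 ++ goB pr.2)
    else
      let pr := codeRun (d :: cs); c :: (pr.1 ++ goB pr.2)
termination_by l => l.length
decreasing_by
  · have := findSplit_rest_length '\n' cs p r h; simp; omega
  · have := findSplit2_rest_length cs p r h; simp; omega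
  · have := findSplit_rest_length '`' (d :: cs) p r h; simp at this ⊢; omega
  · have := scanQuoted_rest_length '"' true (d :: cs); simp at this ⊢; omega
  · have := scanQuoted_rest_length '\'' false (d :: cs); simp at this ⊢; omega
  · have := codeRun_rest_length (d :: cs); simp at this ⊢; omega

def strip_go_alt (src : String) : String := String.mk (goB src.toList)

-- ===== PRECONDITION & SPEC =====
def Spec_strip_go (src : String) (out : String) : Prop := out = strip_go_alt src
instance (src : String) (out : String) : Decidable (Spec_strip_go src out) := by unfold Spec_strip_go; infer_instance

-- ===== CLAIM (what is proved, stated in full; the proofs are below) =====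
def Claim_equal_strip_go : Prop := ∀ (src : String), Dom_strip_go src → Spec_strip_go src (strip_go src)

-- ===== LEMMAS AND PROOFS =====

theorem lineC_eq (l : List Char) :
    loopA .lineC l =
      (match findSplit '\n' l with
       | none => l.map blankLC
       | some (p, r) => p.map blankLC ++ '\n' :: loopA .code r) := by
  induction l with
  | nil => simp [loopA, findSplit]
  | cons c cs ih =>
    by_cases hc : c = '\n'
    · subst hc; simp [loopA, findSplit]
    · cases hfs : findSplit '\n' cs <;> simp_all [loopA, findSplit, hc, blankLC]

theorem blockC_eq (l : List Char) :
    loopA .blockC l =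
      (match findSplit2 l with
       | none => l.map blankBC
       | some (p, r) => p.map blankBC ++ ' ' :: ' ' :: loopA .code r) := by
  fun_induction findSplit2 l with
  | case1 => simp [loopA]
  | case2 c => simp [loopA, findSplit2, blankBC]
  | case3 c d cs hC => simp [loopA, hC.1, hC.2]
  | case4 c d cs hC ih =>
    have hcond : ¬(c = '*' ∧ (d :: cs).head? = some '/') := by
      simpa using hC
    cases hfs : findSplit2 (d :: cs) <;>
      simp_all [loopA, hcond, blankBC]

theorem rstrS_eq (l : List Char) :
    loopA .rstrS l =
      (match findSplit '`' l with
       | none => l.map blankRS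
       | some (p, r) => p.map blankRS ++ ' ' :: loopA .code r) := by
  induction l with
  | nil => simp [loopA, findSplit]
  | cons c cs ih =>
    by_cases hc : c = '`'
    · subst hc; simp [loopA, findSplit]
    · cases hfs : findSplit '`' cs <;> simp_all [loopA, findSplit, hc, blankRS]

theorem strS_eq (l : List Char) :
    loopA .strS l = (scanQuoted '"' true l).1 ++ loopA .code (scanQuoted '"' true l).2 := by
  fun_induction scanQuoted '"' true l with
  | case1 => simp [loopA]
  | case2 => simp [loopA]
  | case3 c hc => simp [loopA, hc]
  | case4 d cs pr ih => simp_all [loopA]; rfl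
  | case5 d cs hc => simp [loopA, hc]
  | case6 c d cs h1 h2 pr ih => simp_all [loopA, h1, h2]; rfl

theorem runeS_eq (l : List Char) :
    loopA .runeS l = (scanQuoted '\'' false l).1 ++ loopA .code (scanQuoted '\'' false l).2 := by
  fun_induction scanQuoted '\'' false l with
  | case1 => simp [loopA]
  | case2 => simp [loopA]
  | case3 c hc => simp [loopA, hc]
  | case4 d cs pr ih => simp_all [loopA]; rfl
  | case5 d cs hc => simp [loopA, hc]
  | case6 c d cs h1 h2 pr ih => simp_all [loopA, h1, h2]; rfl

theorem codeRun_eq (l : List Char) :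
    (codeRun l).1 ++ loopA .code (codeRun l).2 = loopA .code l := by
  fun_induction codeRun l with
  | case1 => simp [loopA]
  | case2 c cs h => simp
  | case3 c cs h1 h2 => simp
  | case4 c cs h1 h2 pr ih =>
    push_neg at h1 h2
    have hA : loopA .code (c :: cs) = c :: loopA .code cs := by
      rcases h1 with ⟨hq1, hq2, hq3⟩
      by_cases hcs : c = '/'
      · have := h2 hcs
        simp [loopA, hq1, hq2, hq3, hcs, this.1, this.2]
      · simp [loopA, hq1, hq2, hq3, hcs]
    show c :: (codeRun cs).1 ++ loopA .code (codeRun cs).2 = _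
    rw [hA, List.cons_append, ih]

theorem main_eq_aux : ∀ (n : Nat) (l : List Char), l.length ≤ n → loopA .code l = goB l := by
  intro n
  induction n with
  | zero =>
    intro l hl
    have : l = [] := by cases l <;> simp_all
    subst this; simp [loopA, goB]
  | succ n ih =>
    intro l hl
    match l with
    | [] => simp [loopA, goB]
    | [c] =>
      by_cases h1 : c = '"'
      · simp [loopA, goB, h1]
      · by_cases h2 : c = '`'
        · simp [loopA, goB, h1, h2]
        · by_cases h3 : c = '\''
          · simp [loopA, goB, h1, h2, h3]
          · simp [loopA, goB, h1, h2, h3]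
    | c :: d :: cs =>
      simp only [List.length_cons] at hl
      by_cases h1 : c = '/' ∧ d = '/'
      · rw [goB]
        rw [if_pos h1]
        have hA : loopA .code (c :: d :: cs) = ' ' :: ' ' :: loopA .lineC cs := by
          simp [loopA, h1.1, h1.2]
        rw [hA, lineC_eq]
        cases hfs : findSplit '\n' cs with
        | none => simp
        | some pr =>
          obtain ⟨p, r⟩ := pr
          have hr := findSplit_rest_length '\n' cs p r hfs
          simp [ih r (by omega)]
      · by_cases h2 : c = '/' ∧ d = '*'
        · rw [goB, if_neg h1, if_pos h2]
          have hA : loopA .code (c :: d :: cs) = ' ' :: ' ' :: loopA .blockC cs := by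
            simp [loopA, h1, h2.1, h2.2]
          rw [hA, blockC_eq]
          cases hfs : findSplit2 cs with
          | none => simp
          | some pr =>
            obtain ⟨p, r⟩ := pr
            have hr := findSplit2_rest_length cs p r hfs
            simp [ih r (by omega)]
        · by_cases h3 : c = '`'
          · rw [goB, if_neg h1, if_neg h2, if_pos h3]
            have hA : loopA .code (c :: d :: cs) = ' ' :: loopA .rstrS (d :: cs) := by
              simp_all [loopA, h3]
            rw [hA, rstrS_eq]
            cases hfs : findSplit '`' (d :: cs) with
            | none => simp
            | some pr =>
              obtain ⟨p, r⟩ := pr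
              have hr := findSplit_rest_length '`' (d :: cs) p r hfs
              simp only [List.length_cons] at hr
              simp [ih r (by omega)]
          · by_cases h4 : c = '"'
            · rw [goB, if_neg h1, if_neg h2, if_neg h3, if_pos h4]
              have hA : loopA .code (c :: d :: cs) = ' ' :: loopA .strS (d :: cs) := by
                simp_all [loopA, h4]
              rw [hA, strS_eq]
              have hr := scanQuoted_rest_length '"' true (d :: cs)
              simp only [List.length_cons] at hr
              rw [ih _ (by omega)]
            · by_cases h5 : c = '\''
              · rw [goB, if_neg h1, if_neg h2, if_neg h3, if_neg h4, if_pos h5]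
                have hA : loopA .code (c :: d :: cs) = ' ' :: loopA .runeS (d :: cs) := by
                  simp_all [loopA, h5]
                rw [hA, runeS_eq]
                have hr := scanQuoted_rest_length '\'' false (d :: cs)
                simp only [List.length_cons] at hr
                rw [ih _ (by omega)]
              · rw [goB, if_neg h1, if_neg h2, if_neg h3, if_neg h4, if_neg h5]
                have hA : loopA .code (c :: d :: cs) = c :: loopA .code (d :: cs) := by
                  by_cases hcs : c = '/'
                  · have hd1 : ¬d = '/' := fun hd => h1 ⟨hcs, hd⟩
                    have hd2 : ¬d = '*' := fun hd => h2 ⟨hcs, hd⟩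
                    simp [loopA, hcs, hd1, hd2, h3, h4, h5]
                  · simp [loopA, hcs, h3, h4, h5]
                rw [hA, ← codeRun_eq (d :: cs)]
                have hr := codeRun_rest_length (d :: cs)
                simp only [List.length_cons] at hr
                rw [ih _ (by omega)]

theorem main_eq (l : List Char) : loopA .code l = goB l :=
  main_eq_aux l.length l le_rfl

-- ===== VERDICT (by name: the statement is the Claim_ definition above) =====
theorem strip_go_spec : Claim_equal_strip_go := by
  intro src _
  unfold Spec_strip_go strip_go strip_go_alt
  exact congrArg String.mk (main_eq src.toList)
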